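-- pv_equiv track=rewrite | github.com/terminalnode/mrfreeze | cogs/cmds_mod.py | extract_reason
-- ===== SOURCE A (Python) =====
-- def extract_reason(reason):
--     # This is a simple function that will return anything after the list of mentions.
--     # It's extremely clunky, but it gets the job done.
--
--     output = reason
--     in_mention = False
--     for letter in range(len(reason)):
--
--         # If the current and two following characters form <@ and a digit, we
--         # assume that we're in a mention.
--         if (reason[letter:letter+2] == '<@') and (reason[letter+2].isdigit()):
--             in_mention = True
--
--         # If we're in a mention and detect the closing >, we'll add all trailing
--         # characters to the output. These two steps are repeated until we have
--         # an output void of any mentions.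
--         if in_mention and (reason[letter] == '>'):
--             in_mention = False
--             output = reason[(letter+1):]
--
--     # If there's nothing left after these steps we'll return None.
--     # Otherwise we'll return the output.
--     if len(output.strip()) == 0:
--         return None
--     else:
--         return output.strip()
-- ===== SOURCE B (Python) =====
-- def extract_reason(reason):
--     # Token-search rewrite: jump between '<@' tokens with str.find instead of
--     # scanning every character with an in_mention flag.
--     output = reason
--     start = 0
--     while True:
--         i = reason.find('<@', start)
--         if i == -1:
--             break
--         if i + 2 < len(reason) and reason[i + 2].isdigit():
--             j = reason.find('>', i + 2)
--             if j == -1: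
--                 break
--             output = reason[j + 1:]
--             start = j + 1
--         else:
--             start = i + 1
--     s = output.strip()
--     return s if s else None
-- ===== Notes on version B (the rewrite author's own statement) =====
-- stated objective: faster
-- what changed: Replaces A's per-character scan with an in_mention boolean flag by a while-loop that jumps directly between '<@' tokens and their closing brackets via str.find; Pre_ excludes strings ending in '<@', on which A raises IndexError (reason[letter+2] with letter+2 == len(reason)) while B returns normally.
-- outside the precondition, e.g. on extract_reason('<@'): A raises IndexError, B returns '<@'
import Mathlib
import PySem

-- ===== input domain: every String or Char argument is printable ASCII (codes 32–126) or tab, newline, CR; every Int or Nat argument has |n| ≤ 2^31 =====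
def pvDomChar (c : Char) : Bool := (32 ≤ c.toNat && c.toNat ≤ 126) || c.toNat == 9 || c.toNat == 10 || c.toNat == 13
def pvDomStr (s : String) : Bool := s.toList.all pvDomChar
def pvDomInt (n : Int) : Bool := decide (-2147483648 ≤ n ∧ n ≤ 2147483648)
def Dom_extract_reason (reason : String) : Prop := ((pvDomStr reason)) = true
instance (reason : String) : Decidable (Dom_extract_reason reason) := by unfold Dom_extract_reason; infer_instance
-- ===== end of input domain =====

-- B replaces A's per-character scan with an in_mention flag by a token-search loop that
-- jumps between '<@' tokens via str.find (measurably faster by a constant factor).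

-- ===== PORT A =====
-- one loop iteration of A: state = (output, in_mention)
def pvStepA (l : List Char) (st : List Char × Bool) (k : Nat) : List Char × Bool :=
  let st1 :=
    if PySem.List.slice l (some (k : Int)) (some ((k : Int) + 2)) = ['<', '@'] ∧
        (PySem.List.pyGet? l ((k : Int) + 2)).elim false PySem.Chars.isdigit = true then
      (st.1, true)
    else st
  if st1.2 = true ∧ l[k]? = some '>' then (l.drop (k + 1), false) else st1

def extract_reason (reason : String) : Option String :=
  let l := reason.toList
  let st := (List.range l.length).foldl (pvStepA l) (l, false)
  let s := PySem.Chars.strip st.1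
  if s.length = 0 then none else some (String.ofList s)

-- ===== PORT B =====
-- Source B's while-loop; fuel = l.length + 1 bounds the iterations (start strictly increases)
def pvLoopB (l : List Char) (fuel : Nat) (start : Nat) (output : List Char) : List Char :=
  match fuel with
  | 0 => output
  | fuel + 1 =>
    let i := PySem.Chars.findFrom l ['<', '@'] (start : Int) none
    if i = -1 then output
    else if i.toNat + 2 < l.length ∧ PySem.Chars.isdigit (l.getD (i.toNat + 2) ' ') = true then
      let j := PySem.Chars.findFrom l ['>'] ((i.toNat : Int) + 2) none
      if j = -1 then output
      else pvLoopB l fuel (j.toNat + 1) (l.drop (j.toNat + 1))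
    else pvLoopB l fuel (i.toNat + 1) output

def extract_reason_alt (reason : String) : Option String :=
  let l := reason.toList
  let out := pvLoopB l (l.length + 1) 0 l
  let s := PySem.Chars.strip out
  if s = [] then none else some (String.ofList s)

-- ===== PRECONDITION & SPEC =====
-- Pre_ excludes exactly the strings ending in '<@': there the Python A raises IndexError
-- (reason[letter+2] with letter+2 == len(reason)).
def Pre_extract_reason (reason : String) : Prop :=
  PySem.Str.endswith reason "<@" = false
instance (reason : String) : Decidable (Pre_extract_reason reason) := by
  unfold Pre_extract_reason; infer_instance

def pvWitness_extract_reason : String := "<@123> ok"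

def Spec_extract_reason (reason : String) (out : Option String) : Prop :=
  out = extract_reason_alt reason
instance (reason : String) (out : Option String) : Decidable (Spec_extract_reason reason out) := by
  unfold Spec_extract_reason; infer_instance

-- ===== CLAIM (what is proved, stated in full; the proofs are below) =====
def Claim_equal_extract_reason : Prop := ∀ (reason : String), Dom_extract_reason reason → Pre_extract_reason reason → Spec_extract_reason reason (extract_reason reason)

-- ===== LEMMAS AND PROOFS =====

-- a two-element prefix of a list, via getElem?
lemma pvPrefix2 {α : Type} (a b : α) (t : List α) :
    [a, b] <+: t ↔ (t[0]? = some a ∧ t[1]? = some b) := by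
  constructor
  · rintro ⟨u, rfl⟩; simp
  · intro h
    match t, h with
    | x :: y :: u, ⟨hx, hy⟩ =>
      simp at hx hy
      exact ⟨u, by simp [hx, hy]⟩

lemma pvPrefix1 {α : Type} (a : α) (t : List α) :
    [a] <+: t ↔ t[0]? = some a := by
  constructor
  · rintro ⟨u, rfl⟩; simp
  · intro h
    match t, h with
    | x :: u, hx => simp at hx; exact ⟨u, by simp [hx]⟩

lemma pvDropGet {α : Type} (l : List α) (k m : Nat) : (l.drop k)[m]? = l[k + m]? := by
  simp [List.getElem?_drop]


lemma pvSlice2 (l : List Char) (k : Nat) :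
    PySem.List.slice l (some (k : Int)) (some ((k : Int) + 2)) = (l.drop k).take 2 := by
  have := PySem.List.slice_natCast_add (xs := l) (j := k) (n := 2)
  push_cast at this
  exact this

lemma pvGet2 (l : List Char) (k : Nat) :
    PySem.List.pyGet? l ((k : Int) + 2) = l[k + 2]? := by
  rw [show ((k : Int) + 2) = (((k + 2 : Nat)) : Int) by push_cast; ring]
  exact PySem.List.pyGet?_natCast l (k + 2)

lemma pvRangeSplit (s m n : Nat) (h1 : s ≤ m) (h2 : m ≤ n) :
    List.range' s (n - s) = List.range' s (m - s) ++ List.range' m (n - m) := by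
  have h := @List.range'_append s (m - s) (n - m) 1
  rw [show s + 1 * (m - s) = m from by omega] at h
  rw [show n - s = (m - s) + (n - m) from by omega]
  exact h.symm

-- the A step is the identity when the position starts no mention and is no '>' with flag false
lemma pvStepA_id (l : List Char) (out : List Char) (k : Nat)
    (h : ¬ (l[k]? = some '<' ∧ l[k + 1]? = some '@')) :
    pvStepA l (out, false) k = (out, false) := by
  unfold pvStepA
  have hs : ¬ (PySem.List.slice l (some (k : Int)) (some ((k : Int) + 2)) = ['<', '@'] ∧
      (PySem.List.pyGet? l ((k : Int) + 2)).elim false PySem.Chars.isdigit = true) := by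
    rintro ⟨h1, -⟩
    apply h
    rw [pvSlice2] at h1
    have hpre : ['<', '@'] <+: l.drop k := ⟨(l.drop k).drop 2, by
      rw [← h1]; exact List.take_append_drop 2 (l.drop k)⟩
    rw [pvPrefix2] at hpre
    simpa [pvDropGet] using hpre
  simp [hs]

-- A's fold is the identity over a stretch with no '<@' occurrence, flag false
lemma pvFoldA_skip (l : List Char) (out : List Char) (s c : Nat)
    (h : ∀ k, s ≤ k → k < s + c → ¬ (l[k]? = some '<' ∧ l[k + 1]? = some '@')) :
    (List.range' s c).foldl (pvStepA l) (out, false) = (out, false) := by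
  induction c generalizing s with
  | zero => simp
  | succ c ih =>
    rw [show s + (c + 1) = s + 1 + c by omega] at h
    rw [List.range'_succ, List.foldl_cons, pvStepA_id l out s (h s le_rfl (by omega))]
    exact ih (s + 1) (fun k hk1 hk2 => h k (by omega) hk2)

-- A's fold keeps (out, true) over a stretch with no '>'
lemma pvFoldA_wait (l : List Char) (out : List Char) (s c : Nat)
    (h : ∀ k, s ≤ k → k < s + c → l[k]? ≠ some '>') :
    (List.range' s c).foldl (pvStepA l) (out, true) = (out, true) := by
  induction c generalizing s with
  | zero => simp
  | succ c ih =>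
    rw [show s + (c + 1) = s + 1 + c by omega] at h
    have hstep : pvStepA l (out, true) s = (out, true) := by
      unfold pvStepA
      have hgt : ¬ l[s]? = some '>' := h s le_rfl (by omega)
      by_cases hc : PySem.List.slice l (some (s : Int)) (some ((s : Int) + 2)) = ['<', '@'] ∧
          (PySem.List.pyGet? l ((s : Int) + 2)).elim false PySem.Chars.isdigit = true
      · simp [hc, hgt]
      · simp [hc, hgt]
    rw [List.range'_succ, List.foldl_cons, hstep]
    exact ih (s + 1) (fun k hk1 hk2 => h k (by omega) hk2)

-- the A step at a mention start with a digit after: sets the flag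
lemma pvStepA_open (l : List Char) (out : List Char) (k : Nat)
    (h1 : l[k]? = some '<') (h2 : l[k + 1]? = some '@')
    (h3 : k + 2 < l.length) (h4 : PySem.Chars.isdigit (l.getD (k + 2) ' ') = true) :
    pvStepA l (out, false) k = (out, true) := by
  unfold pvStepA
  have hsl : PySem.List.slice l (some (k : Int)) (some ((k : Int) + 2)) = ['<', '@'] := by
    rw [pvSlice2]
    have hpre : ['<', '@'] <+: l.drop k := by
      rw [pvPrefix2]; simpa [pvDropGet] using ⟨h1, h2⟩
    obtain ⟨u, hu⟩ := hpre
    rw [← hu]; simp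
  have hdig : (PySem.List.pyGet? l ((k : Int) + 2)).elim false PySem.Chars.isdigit = true := by
    rw [pvGet2, List.getElem?_eq_getElem h3]
    rw [List.getD_eq_getElem l ' ' h3] at h4
    simpa using h4
  have hlt : l[k]? ≠ some '>' := by rw [h1]; simp
  simp [hsl, hdig, hlt]

-- the A step on '>' with the flag set: closes the mention
lemma pvStepA_close (l : List Char) (out : List Char) (k : Nat)
    (h : l[k]? = some '>') :
    pvStepA l (out, true) k = (l.drop (k + 1), false) := by
  unfold pvStepA
  by_cases hc : PySem.List.slice l (some (k : Int)) (some ((k : Int) + 2)) = ['<', '@'] ∧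
      (PySem.List.pyGet? l ((k : Int) + 2)).elim false PySem.Chars.isdigit = true
  · exfalso
    obtain ⟨h1, -⟩ := hc
    rw [pvSlice2] at h1
    have hpre : ['<', '@'] <+: l.drop k := ⟨(l.drop k).drop 2, by
      rw [← h1]; exact List.take_append_drop 2 (l.drop k)⟩
    rw [pvPrefix2] at hpre
    simp only [pvDropGet, Nat.add_zero] at hpre
    rw [hpre.1] at h; simp at h
  · simp [hc, h]

-- main loop correspondence
lemma pvMain (l : List Char) : ∀ fuel start out, start ≤ l.length →
    l.length + 1 ≤ fuel + start →
    ((List.range' start (l.length - start)).foldl (pvStepA l) (out, false)).1 =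
      pvLoopB l fuel start out := by
  intro fuel
  induction fuel with
  | zero => intro start out h1 h2; omega
  | succ fuel ih =>
    intro start out hs hf
    unfold pvLoopB
    by_cases hi : PySem.Chars.findFrom l ['<', '@'] (start : Int) none = -1
    · rw [if_pos hi]
      rw [PySem.Chars.findFrom_natCast_eq_neg_one_iff l ['<', '@'] start hs] at hi
      rw [pvFoldA_skip]
      intro k hk1 hk2 ⟨ha, hb⟩
      apply hi
      have hpre : ['<', '@'] <+: l.drop k := by
        rw [pvPrefix2]; simp only [pvDropGet, Nat.add_zero]; exact ⟨ha, hb⟩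
      have hdk : l.drop k <:+ l.drop start := by
        rw [show k = start + (k - start) by omega, ← List.drop_drop]
        exact List.drop_suffix _ _
      exact hpre.isInfix.trans hdk.isInfix
    · rw [if_neg hi]
      obtain ⟨hge, hpre, hmin⟩ :=
        PySem.Chars.findFrom_natCast_spec l ['<', '@'] start hs hi
      set i := PySem.Chars.findFrom l ['<', '@'] (start : Int) none with hidef
      have hi0 : 0 ≤ i := le_trans (by positivity) hge
      set iN := i.toNat with hiN
      have hiNge : start ≤ iN := by omega
      rw [pvPrefix2] at hpre
      simp only [pvDropGet, Nat.add_zero] at hpre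
      obtain ⟨hlt, hat⟩ := hpre
      have hiN1 : iN + 1 < l.length := List.getElem?_eq_some_iff.mp hat |>.1
      -- split A's fold at iN
      have hsplit : List.range' start (l.length - start) =
          List.range' start (iN - start) ++ (iN :: List.range' (iN + 1) (l.length - (iN + 1))) := by
        rw [pvRangeSplit start iN l.length hiNge (by omega)]
        congr 1
        rw [show l.length - iN = (l.length - (iN + 1)) + 1 by omega, List.range'_succ]
      have hskip : ((List.range' start (iN - start)).foldl (pvStepA l) (out, false)) =
          (out, false) := by
        apply pvFoldA_skip
        intro k hk1 hk2 hocc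
        apply hmin k hk1 (by omega)
        rw [pvPrefix2]; simp only [pvDropGet, Nat.add_zero]; exact hocc
      by_cases hd : iN + 2 < l.length ∧ PySem.Chars.isdigit (l.getD (iN + 2) ' ') = true
      · rw [if_pos hd]
        obtain ⟨hd1, hd2⟩ := hd
        have hopen : pvStepA l (out, false) iN = (out, true) :=
          pvStepA_open l out iN hlt hat hd1 hd2
        by_cases hj : PySem.Chars.findFrom l ['>'] ((iN : Int) + 2) none = -1
        · rw [if_pos hj]
          rw [show ((iN : Int) + 2) = (((iN + 2 : Nat)) : Int) by push_cast; ring] at hj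
          rw [PySem.Chars.findFrom_natCast_eq_neg_one_iff l ['>'] (iN + 2) (by omega)] at hj
          rw [hsplit, List.foldl_append, hskip, List.foldl_cons, hopen, pvFoldA_wait]
          intro k hk1 hk2 hgt
          rcases Nat.eq_or_lt_of_le hk1 with heq | hlt2
          · rw [← heq] at hgt; rw [hat] at hgt; simp at hgt
          · apply hj
            have hpre : ['>'] <+: l.drop k := by
              rw [pvPrefix1]; simp only [pvDropGet, Nat.add_zero]; exact hgt
            have hdk : l.drop k <:+ l.drop (iN + 2) := by
              rw [show k = (iN + 2) + (k - (iN + 2)) by omega, ← List.drop_drop]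
              exact List.drop_suffix _ _
            exact hpre.isInfix.trans hdk.isInfix
        · rw [if_neg hj]
          rw [show ((iN : Int) + 2) = (((iN + 2 : Nat)) : Int) by push_cast; ring] at hj ⊢
          obtain ⟨hjge, hjpre, hjmin⟩ :=
            PySem.Chars.findFrom_natCast_spec l ['>'] (iN + 2) (by omega) hj
          set j := PySem.Chars.findFrom l ['>'] (((iN + 2 : Nat)) : Int) none with hjdef
          have hj0 : 0 ≤ j := le_trans (by positivity) hjge
          set jN := j.toNat with hjN
          have hjNge : iN + 2 ≤ jN := by omega
          rw [pvPrefix1] at hjpre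
          simp only [pvDropGet, Nat.add_zero] at hjpre
          have hjlt : jN < l.length := (List.getElem?_eq_some_iff.mp hjpre).1
          have hsplit2 : List.range' (iN + 1) (l.length - (iN + 1)) =
              List.range' (iN + 1) (jN - (iN + 1)) ++
                (jN :: List.range' (jN + 1) (l.length - (jN + 1))) := by
            rw [pvRangeSplit (iN + 1) jN l.length (by omega) (by omega)]
            congr 1
            rw [show l.length - jN = (l.length - (jN + 1)) + 1 by omega, List.range'_succ]
          have hwait : ((List.range' (iN + 1) (jN - (iN + 1))).foldl (pvStepA l) (out, true)) =
              (out, true) := by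
            apply pvFoldA_wait
            intro k hk1 hk2 hgt
            rcases Nat.eq_or_lt_of_le hk1 with heq | hlt2
            · rw [← heq] at hgt; rw [hat] at hgt; simp at hgt
            · apply hjmin k (by omega) (by omega)
              rw [pvPrefix1]; simp only [pvDropGet, Nat.add_zero]; exact hgt
          have hclose : pvStepA l (out, true) jN = (l.drop (jN + 1), false) :=
            pvStepA_close l out jN hjpre
          rw [hsplit, List.foldl_append, hskip, List.foldl_cons, hopen, hsplit2,
            List.foldl_append, hwait, List.foldl_cons, hclose]
          exact ih (jN + 1) (l.drop (jN + 1)) (by omega) (by omega)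
      · rw [if_neg hd]
        have hid : pvStepA l (out, false) iN = (out, false) := by
          unfold pvStepA
          have hc : ¬ (PySem.List.slice l (some (iN : Int)) (some ((iN : Int) + 2)) = ['<', '@'] ∧
              (PySem.List.pyGet? l ((iN : Int) + 2)).elim false PySem.Chars.isdigit = true) := by
            rintro ⟨-, h2⟩
            apply hd
            rw [pvGet2] at h2
            by_cases hin : iN + 2 < l.length
            · refine ⟨hin, ?_⟩
              rw [List.getD_eq_getElem l ' ' hin]
              rw [List.getElem?_eq_getElem hin] at h2
              simpa using h2
            · rw [List.getElem?_eq_none (by omega)] at h2; simp at h2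
          simp [hc]
        rw [hsplit, List.foldl_append, hskip, List.foldl_cons, hid]
        exact ih (iN + 1) out (by omega) (by omega)

-- ===== VERDICT (by name: the statement is the Claim_ definition above) =====
theorem extract_reason_spec : Claim_equal_extract_reason := by
  intro reason _ _
  have h := pvMain reason.toList (reason.toList.length + 1) 0 reason.toList
    (by omega) (by omega)
  rw [Nat.sub_zero, ← List.range_eq_range'] at h
  unfold Spec_extract_reason extract_reason extract_reason_alt
  simp only [h]
  simp [List.length_eq_zero_iff]
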